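-- pv_equiv track=rewrite | github.com/FrancoCanova01/Algorithms | src/lists/triplet_sum_close_to_target.py | triplet_sum_close_to_target
-- ===== SOURCE A (Python) =====
-- import math
--
-- def triplet_sum_close_to_target(arr, target_sum):
--     arr.sort()
--
--     best_dist = math.inf
--     best_sum = math.inf
--
--     for index, i in enumerate(arr):
--         # Skip repeated elements
--         if index > 0 and arr[index] == arr[index - 1]:
--             continue
--
--         left = index + 1
--         right = len(arr) - 1
--
--         while left < right:
--             current_sum = i + arr[right] + arr[left]
--             dist = abs(target_sum - current_sum)
--
--             if dist == 0:
--                 return current_sum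
--
--             # Update best_dist and best_sum
--             if dist < best_dist or (dist == best_dist and current_sum < best_sum):
--                 best_dist = dist
--                 best_sum = current_sum
--
--             if current_sum < target_sum:
--                 # You need to increase current sum by increasing left pointer
--                 left += 1
--             else:
--                 # You need to decrease current sum by decreasing right pointer
--                 right -= 1
--
--     return best_sum
-- ===== SOURCE B (Python) =====
-- import math
--
-- def triplet_sum_close_to_target(arr, target_sum):
--     arr.sort()
--
--     best_dist = math.inf
--     best_sum = math.inf
--
--     n = len(arr)
--     for i in range(n):
--         for j in range(i + 1, n):
--             for k in range(j + 1, n):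
--                 current_sum = arr[i] + arr[j] + arr[k]
--                 dist = abs(target_sum - current_sum)
--                 if (dist, current_sum) < (best_dist, best_sum):
--                     best_dist, best_sum = dist, current_sum
--
--     return best_sum
-- ===== Notes on version B (the rewrite author's own statement) =====
-- stated objective: simpler
-- what changed: the duplicate-skipping two-pointer scan with an early return on an exact hit is replaced by a plain brute-force loop over all index triples i<j<k keeping the lexicographic minimum of (distance, sum)
import Mathlib
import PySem

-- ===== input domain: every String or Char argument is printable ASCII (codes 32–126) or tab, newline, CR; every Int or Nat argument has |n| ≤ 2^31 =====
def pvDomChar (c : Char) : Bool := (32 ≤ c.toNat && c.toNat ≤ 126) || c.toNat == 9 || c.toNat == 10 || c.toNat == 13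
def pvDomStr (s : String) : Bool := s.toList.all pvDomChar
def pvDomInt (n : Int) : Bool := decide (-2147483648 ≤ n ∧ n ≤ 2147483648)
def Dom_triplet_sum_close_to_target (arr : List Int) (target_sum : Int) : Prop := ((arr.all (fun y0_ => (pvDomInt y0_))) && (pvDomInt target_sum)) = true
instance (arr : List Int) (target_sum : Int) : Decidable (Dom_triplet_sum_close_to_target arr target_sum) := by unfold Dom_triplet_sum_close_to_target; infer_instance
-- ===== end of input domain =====

-- B replaces A's duplicate-skipping two-pointer scan by a plain brute-force loop over all
-- index triples i<j<k with the same (distance, sum) preference: simpler, not faster.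
-- A sorts arr in place (arr.sort()); B performs the same mutation; the equivalence proved
-- here is about the RETURN value.

-- ===== PORT A =====
-- best_dist/best_sum start as math.inf; the state is `none` until the first update
-- (any finite dist is < inf, so the first comparison always updates).
def updA (t : Int) (st : Option (Int × Int)) (s : Int) : Option (Int × Int) :=
  let d := |t - s|
  match st with
  | none => some (d, s)
  | some (bd, bs) => if d < bd ∨ (d = bd ∧ s < bs) then some (d, s) else some (bd, bs)

-- the `while left < right` loop; Sum.inl = the early `return current_sum` on dist == 0.
-- arr[left]/arr[right] are always in range here, so getD is exact.
def innerA (a : List Int) (t i : Int) (l r : Nat) (st : Option (Int × Int)) :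
    Sum Int (Option (Int × Int)) :=
  if h : l < r then
    let s := i + a.getD r 0 + a.getD l 0
    if |t - s| = 0 then Sum.inl s
    else if s < t then innerA a t i (l+1) r (updA t st s)
    else innerA a t i l (r-1) (updA t st s)
  else Sum.inr st
termination_by r - l

-- the `for index, i in enumerate(arr)` loop with the duplicate skip
def outerA (a : List Int) (t : Int) (idx : Nat) (st : Option (Int × Int)) :
    Sum Int (Option (Int × Int)) :=
  if h : idx < a.length then
    if 0 < idx ∧ a.getD idx 0 = a.getD (idx-1) 0 then outerA a t (idx+1) st
    else
      match innerA a t (a.getD idx 0) (idx+1) (a.length - 1) st with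
      | Sum.inl v => Sum.inl v
      | Sum.inr st' => outerA a t (idx+1) st'
  else Sum.inr st
termination_by a.length - idx

def triplet_sum_close_to_target (arr : List Int) (target_sum : Int) : Int :=
  let a := PySem.List.sorted arr (fun x => x) false
  match outerA a target_sum 0 none with
  | Sum.inl v => v
  | Sum.inr (some (_, bs)) => bs
  | Sum.inr none => 0  -- Python returns float inf here (fewer than 3 elements); outside Pre_

-- ===== PORT B =====
-- `(dist, current_sum) < (best_dist, best_sum)` written out as the lexicographic test;
-- state `none` is the initial (inf, inf).
def updB (t : Int) (st : Option (Int × Int)) (s : Int) : Option (Int × Int) :=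
  let d := |t - s|
  match st with
  | none => some (d, s)
  | some (bd, bs) => if d < bd ∨ (d = bd ∧ s < bs) then some (d, s) else some (bd, bs)

-- the three nested `for` loops of B
def bLoop (a : List Int) (t : Int) : Option (Int × Int) :=
  (List.range a.length).foldl (fun st i =>
    (List.range' (i+1) (a.length - (i+1))).foldl (fun st j =>
      (List.range' (j+1) (a.length - (j+1))).foldl (fun st k =>
        updB t st (a.getD i 0 + a.getD j 0 + a.getD k 0)) st) st) none

def triplet_sum_close_to_target_alt (arr : List Int) (target_sum : Int) : Int :=
  let a := PySem.List.sorted arr (fun x => x) false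
  match bLoop a target_sum with
  | some (_, bs) => bs
  | none => 0  -- Python returns float inf here (fewer than 3 elements); outside Pre_

-- ===== PRECONDITION & SPEC =====
-- Pre_ excludes lists with fewer than 3 elements: there A returns math.inf, a float,
-- not a value of the declared int type.
def Pre_triplet_sum_close_to_target (arr : List Int) (target_sum : Int) : Prop :=
  3 ≤ arr.length

instance (arr : List Int) (target_sum : Int) : Decidable (Pre_triplet_sum_close_to_target arr target_sum) := by
  unfold Pre_triplet_sum_close_to_target; infer_instance

def pvWitness_triplet_sum_close_to_target : List Int × Int := ([4, -1, 2, 1], 3)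

def Spec_triplet_sum_close_to_target (arr : List Int) (target_sum : Int) (out : Int) : Prop := out = triplet_sum_close_to_target_alt arr target_sum
instance (arr : List Int) (target_sum : Int) (out : Int) : Decidable (Spec_triplet_sum_close_to_target arr target_sum out) := by unfold Spec_triplet_sum_close_to_target; infer_instance

-- ===== CLAIM (what is proved, stated in full; the proofs are below) =====
def Claim_equal_triplet_sum_close_to_target : Prop := ∀ (arr : List Int) (target_sum : Int), Dom_triplet_sum_close_to_target arr target_sum → Pre_triplet_sum_close_to_target arr target_sum → Spec_triplet_sum_close_to_target arr target_sum (triplet_sum_close_to_target arr target_sum)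

-- ===== LEMMAS AND PROOFS =====

-- ---- the multiset of sums A's scan looks at (same pointer moves, no early exit) ----
def visitI (a : List Int) (t i : Int) (l r : Nat) : List Int :=
  if h : l < r then
    (i + a.getD r 0 + a.getD l 0) ::
      (if i + a.getD r 0 + a.getD l 0 < t then visitI a t i (l+1) r else visitI a t i l (r-1))
  else []
termination_by r - l

def visitO (a : List Int) (t : Int) (idx : Nat) : List Int :=
  if h : idx < a.length then
    (if 0 < idx ∧ a.getD idx 0 = a.getD (idx-1) 0 then []
     else visitI a t (a.getD idx 0) (idx+1) (a.length-1)) ++ visitO a t (idx+1)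
  else []
termination_by a.length - idx

-- ---- the list of all triple sums B looks at ----
def sumsB (a : List Int) : List Int :=
  (List.range a.length).flatMap (fun i =>
    (List.range' (i+1) (a.length - (i+1))).flatMap (fun j =>
      (List.range' (j+1) (a.length - (j+1))).map (fun k =>
        a.getD i 0 + a.getD j 0 + a.getD k 0)))

-- ---- lexicographic (dist, sum) minimum ----
def keyLE (t m s : Int) : Prop := |t - m| < |t - s| ∨ (|t - m| = |t - s| ∧ m ≤ s)

def MinOf (t : Int) (V : List Int) (m : Int) : Prop := m ∈ V ∧ ∀ s ∈ V, keyLE t m s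

def Between (s t s' : Int) : Prop := (s ≤ s' ∧ s' ≤ t) ∨ (t ≤ s' ∧ s' ≤ s)

lemma keyLE_refl (t m : Int) : keyLE t m m := Or.inr ⟨rfl, le_refl m⟩

lemma keyLE_trans {t x y z : Int} (h1 : keyLE t x y) (h2 : keyLE t y z) : keyLE t x z := by
  unfold keyLE at *; rcases h1 with h1 | ⟨h1, h1'⟩ <;> rcases h2 with h2 | ⟨h2, h2'⟩ <;>
    first
      | exact Or.inl (by omega)
      | exact Or.inr ⟨by omega, by omega⟩

lemma keyLE_antisymm {t x y : Int} (h1 : keyLE t x y) (h2 : keyLE t y x) : x = y := by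
  unfold keyLE at *; omega

lemma minOf_unique {t : Int} {V : List Int} {m m' : Int}
    (h : MinOf t V m) (h' : MinOf t V m') : m = m' :=
  keyLE_antisymm (h.2 m' h'.1) (h'.2 m h.1)

lemma between_key {s t s' : Int} (h : Between s t s') : |t - s'| < |t - s| ∨ s' = s := by
  rcases h with ⟨h1, h2⟩ | ⟨h1, h2⟩
  · rw [abs_of_nonneg (by omega : (0:Int) ≤ t - s'), abs_of_nonneg (by omega : (0:Int) ≤ t - s)]
    omega
  · rw [abs_of_nonpos (by omega : t - s' ≤ 0), abs_of_nonpos (by omega : t - s ≤ 0)]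
    omega

-- ---- fold characterization ----
lemma foldA_char (t : Int) : ∀ (V : List Int) (m0 : Int),
    ∃ m, MinOf t (m0 :: V) m ∧ V.foldl (updA t) (some (|t - m0|, m0)) = some (|t - m|, m) := by
  intro V
  induction V with
  | nil =>
    intro m0
    exact ⟨m0, ⟨List.mem_singleton.2 rfl, by
      intro s hs; rcases List.mem_singleton.1 hs with rfl; exact keyLE_refl t s⟩, rfl⟩
  | cons s V ih =>
    intro m0
    by_cases hc : |t - s| < |t - m0| ∨ (|t - s| = |t - m0| ∧ s < m0)
    · have hstep : List.foldl (updA t) (some (|t - m0|, m0)) (s :: V)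
          = List.foldl (updA t) (some (|t - s|, s)) V := by
        simp [List.foldl_cons, updA, hc]
      obtain ⟨m, ⟨hmem, hall⟩, hfold⟩ := ih s
      refine ⟨m, ⟨List.mem_cons_of_mem _ hmem, ?_⟩, hstep ▸ hfold⟩
      intro x hx
      rcases List.mem_cons.1 hx with rfl | hx2
      · exact keyLE_trans (hall s List.mem_cons_self) (by unfold keyLE; omega)
      · exact hall x hx2
    · have hstep : List.foldl (updA t) (some (|t - m0|, m0)) (s :: V)
          = List.foldl (updA t) (some (|t - m0|, m0)) V := by
        simp [List.foldl_cons, updA, hc]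
      obtain ⟨m, ⟨hmem, hall⟩, hfold⟩ := ih m0
      refine ⟨m, ⟨?_, ?_⟩, hstep ▸ hfold⟩
      · rcases List.mem_cons.1 hmem with rfl | h
        · exact List.mem_cons_self
        · exact List.mem_cons_of_mem _ (List.mem_cons_of_mem _ h)
      · intro x hx
        rcases List.mem_cons.1 hx with rfl | hx2
        · exact hall x List.mem_cons_self
        · rcases List.mem_cons.1 hx2 with rfl | hx3
          · exact keyLE_trans (hall m0 List.mem_cons_self) (by unfold keyLE; omega)
          · exact hall x (List.mem_cons_of_mem _ hx3)

lemma foldl_none_char (t : Int) (V : List Int) (hV : V ≠ []) :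
    ∃ m, MinOf t V m ∧ V.foldl (updA t) none = some (|t - m|, m) := by
  cases V with
  | nil => exact absurd rfl hV
  | cons s V =>
    have h0 : updA t none s = some (|t - s|, s) := rfl
    obtain ⟨m, hm, hfold⟩ := foldA_char t V s
    exact ⟨m, hm, by simpa [h0] using hfold⟩

-- ---- B's nested folds = fold over sumsB ----
lemma foldl_flatMap {α β γ : Type} (f : β → α → β) (g : γ → List α) :
    ∀ (xs : List γ) (b : β),
      (xs.flatMap g).foldl f b = xs.foldl (fun acc x => (g x).foldl f acc) b := by
  intro xs
  induction xs with
  | nil => intro b; rfl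
  | cons x xs ih => intro b; simp [List.flatMap_cons, List.foldl_append, ih]

lemma bLoop_eq_fold (a : List Int) (t : Int) :
    bLoop a t = (sumsB a).foldl (updA t) none := by
  unfold bLoop sumsB
  rw [foldl_flatMap]
  apply List.foldl_ext
  intro st i _
  rw [foldl_flatMap]
  apply List.foldl_ext
  intro st' j _
  rw [List.foldl_map]
  rfl

lemma mem_sumsB {a : List Int} {s : Int} :
    s ∈ sumsB a ↔ ∃ i j k, i < j ∧ j < k ∧ k < a.length ∧
      s = a.getD i 0 + a.getD j 0 + a.getD k 0 := by
  unfold sumsB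
  simp only [List.mem_flatMap, List.mem_range, List.mem_map, List.mem_range'_1]
  constructor
  · rintro ⟨i, hi, j, ⟨hj1, hj2⟩, k, ⟨hk1, hk2⟩, rfl⟩
    exact ⟨i, j, k, by omega, by omega, by omega, rfl⟩
  · rintro ⟨i, j, k, h1, h2, h3, rfl⟩
    exact ⟨i, by omega, j, ⟨by omega, by omega⟩, k, ⟨by omega, by omega⟩, rfl⟩

-- ---- soundness: everything A's scan visits is a triple sum ----
lemma visitI_sub (a : List Int) (t i : Int) :
    ∀ l r s, s ∈ visitI a t i l r →
      ∃ p q, l ≤ p ∧ p < q ∧ q ≤ r ∧ s = i + a.getD q 0 + a.getD p 0 := by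
  intro l r
  fun_induction visitI a t i l r with
  | case1 l r h ih2 ih1 =>
    intro x hx
    rcases List.mem_cons.1 hx with rfl | hx
    · exact ⟨l, r, le_refl l, h, le_refl r, rfl⟩
    · by_cases hst : i + a.getD r 0 + a.getD l 0 < t
      · rw [if_pos hst] at hx
        obtain ⟨p, q, h1, h2, h3, h4⟩ := ih2 x hx
        exact ⟨p, q, by omega, h2, h3, h4⟩
      · rw [if_neg hst] at hx
        obtain ⟨p, q, h1, h2, h3, h4⟩ := ih1 x hx
        exact ⟨p, q, h1, h2, by omega, h4⟩
  | case2 l r h => intro x hx; simp at hx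

lemma visitO_sub (a : List Int) (t : Int) :
    ∀ idx s, s ∈ visitO a t idx → s ∈ sumsB a := by
  intro idx
  fun_induction visitO a t idx with
  | case1 idx h ih =>
    intro s hs
    rcases List.mem_append.1 hs with hs | hs
    · by_cases hskip : 0 < idx ∧ a.getD idx 0 = a.getD (idx-1) 0
      · rw [if_pos hskip] at hs; simp at hs
      · rw [if_neg hskip] at hs
        obtain ⟨p, q, h1, h2, h3, h4⟩ := visitI_sub a t _ _ _ s hs
        exact mem_sumsB.2 ⟨idx, p, q, by omega, h2, by omega, by omega⟩
    · exact ih s hs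
  | case2 idx h => intro s hs; simp at hs

-- ---- completeness of the two-pointer scan ----
lemma inner_complete (a : List Int) (t i : Int)
    (ha : ∀ p q, p ≤ q → q < a.length → a.getD p 0 ≤ a.getD q 0) :
    ∀ l r, ∀ p q, l ≤ p → p < q → q ≤ r → r < a.length →
      ∃ s' ∈ visitI a t i l r, Between (i + a.getD q 0 + a.getD p 0) t s' := by
  intro l r
  fun_induction visitI a t i l r with
  | case1 l r h ih2 ih1 =>
    intro p q h2 h3 h4 h5
    by_cases hst : i + a.getD r 0 + a.getD l 0 < t
    · rw [if_pos hst]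
      by_cases hlp : l < p
      · obtain ⟨s', hm, hb⟩ := ih2 p q (by omega) h3 h4 h5
        exact ⟨s', List.mem_cons_of_mem _ hm, hb⟩
      · have hlp' : l = p := by omega
        subst hlp'
        refine ⟨i + a.getD r 0 + a.getD l 0, List.mem_cons_self, Or.inl ⟨?_, by omega⟩⟩
        have := ha q r h4 h5
        omega
    · rw [if_neg hst]
      by_cases hqr : q < r
      · obtain ⟨s', hm, hb⟩ := ih1 p q h2 h3 (by omega) (by omega)
        exact ⟨s', List.mem_cons_of_mem _ hm, hb⟩
      · have hqr' : q = r := by omega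
        refine ⟨i + a.getD r 0 + a.getD l 0, List.mem_cons_self, Or.inr ⟨by omega, ?_⟩⟩
        have h6 := ha l p (by omega) (by omega)
        rw [hqr']
        omega
  | case2 l r h => intro p q h2 h3 h4 h5; omega

lemma visitO_super (a : List Int) (t : Int) :
    ∀ idx p, idx ≤ p → p < a.length → ¬(0 < p ∧ a.getD p 0 = a.getD (p-1) 0) →
      ∀ s ∈ visitI a t (a.getD p 0) (p+1) (a.length - 1), s ∈ visitO a t idx := by
  intro idx
  fun_induction visitO a t idx with
  | case1 idx h ih =>
    intro p hip hp hskip s hs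
    rcases Nat.eq_or_lt_of_le hip with he | he
    · subst he
      exact List.mem_append.2 (Or.inl (by rw [if_neg hskip]; exact hs))
    · exact List.mem_append.2 (Or.inr (ih p (by omega) hp hskip s hs))
  | case2 idx h => intro p hip hp hskip s hs; omega

lemma outer_complete (a : List Int) (t : Int)
    (ha : ∀ p q, p ≤ q → q < a.length → a.getD p 0 ≤ a.getD q 0) :
    ∀ p q r, p < q → q < r → r < a.length →
      ∃ s' ∈ visitO a t 0, Between (a.getD p 0 + a.getD q 0 + a.getD r 0) t s' := by
  intro p
  induction p using Nat.strong_induction_on with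
  | _ p ih =>
    intro q r h1 h2 h3
    by_cases hskip : 0 < p ∧ a.getD p 0 = a.getD (p-1) 0
    · obtain ⟨s', hm, hb⟩ := ih (p-1) (by omega) q r (by omega) h2 h3
      refine ⟨s', hm, ?_⟩
      have he : a.getD (p-1) 0 = a.getD p 0 := hskip.2.symm
      rwa [he] at hb
    · obtain ⟨s', hm, hb⟩ :=
        inner_complete a t (a.getD p 0) ha (p+1) (a.length - 1) q r (by omega) h2 (by omega) (by omega)
      refine ⟨s', visitO_super a t 0 p (by omega) (by omega) hskip s' hm, ?_⟩
      have he : a.getD p 0 + a.getD r 0 + a.getD q 0 = a.getD p 0 + a.getD q 0 + a.getD r 0 := by ring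
      rwa [he] at hb

-- ---- A's program in terms of its visited list ----
lemma innerA_mem (a : List Int) (t i : Int) :
    ∀ l r st, t ∈ visitI a t i l r → innerA a t i l r st = Sum.inl t := by
  intro l r st
  fun_induction innerA a t i l r st with
  | case1 l r st h s hd =>
    intro _
    have hd' : |t - (i + a.getD r 0 + a.getD l 0)| = 0 := hd
    have : i + a.getD r 0 + a.getD l 0 = t := by
      have := abs_eq_zero.mp hd'; omega
    exact congrArg Sum.inl this
  | case2 l r st h s hd hst ih =>
    intro hmem
    have hst' : i + a.getD r 0 + a.getD l 0 < t := hst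
    rw [visitI, dif_pos h, if_pos hst'] at hmem
    rcases List.mem_cons.1 hmem with he | hmem'
    · exfalso
      have hd' : ¬ |t - (i + a.getD r 0 + a.getD l 0)| = 0 := hd
      apply hd'
      rw [← he]; simp
    · exact ih hmem'
  | case3 l r st h s hd hst ih =>
    intro hmem
    have hst' : ¬ i + a.getD r 0 + a.getD l 0 < t := hst
    rw [visitI, dif_pos h, if_neg hst'] at hmem
    rcases List.mem_cons.1 hmem with he | hmem'
    · exfalso
      have hd' : ¬ |t - (i + a.getD r 0 + a.getD l 0)| = 0 := hd
      apply hd'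
      rw [← he]; simp
    · exact ih hmem'
  | case4 l r st h =>
    intro hmem
    rw [visitI, dif_neg h] at hmem
    simp at hmem

lemma innerA_fold (a : List Int) (t i : Int) :
    ∀ l r st, t ∉ visitI a t i l r →
      innerA a t i l r st = Sum.inr ((visitI a t i l r).foldl (updA t) st) := by
  intro l r st
  fun_induction innerA a t i l r st with
  | case1 l r st h s hd =>
    intro hmem
    exfalso
    apply hmem
    rw [visitI, dif_pos h]
    have hd' : |t - (i + a.getD r 0 + a.getD l 0)| = 0 := hd
    have he : i + a.getD r 0 + a.getD l 0 = t := by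
      have := abs_eq_zero.mp hd'; omega
    rw [he]
    exact List.mem_cons_self
  | case2 l r st h s hd hst ih =>
    intro hmem
    have hst' : i + a.getD r 0 + a.getD l 0 < t := hst
    rw [visitI, dif_pos h, if_pos hst'] at hmem ⊢
    rw [List.foldl_cons]
    exact ih (fun hc => hmem (List.mem_cons_of_mem _ hc))
  | case3 l r st h s hd hst ih =>
    intro hmem
    have hst' : ¬ i + a.getD r 0 + a.getD l 0 < t := hst
    rw [visitI, dif_pos h, if_neg hst'] at hmem ⊢
    rw [List.foldl_cons]
    exact ih (fun hc => hmem (List.mem_cons_of_mem _ hc))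
  | case4 l r st h =>
    intro _
    rw [visitI, dif_neg h]
    rfl

lemma outerA_mem (a : List Int) (t : Int) :
    ∀ idx st, t ∈ visitO a t idx → outerA a t idx st = Sum.inl t := by
  intro idx st
  fun_induction outerA a t idx st with
  | case1 idx st h hskip ih =>
    intro hmem
    apply ih
    rw [visitO, dif_pos h, if_pos hskip] at hmem
    simpa using hmem
  | case2 idx st h hskip v heq =>
    intro hmem
    rw [visitO, dif_pos h, if_neg hskip] at hmem
    by_cases hblk : t ∈ visitI a t (a.getD idx 0) (idx+1) (a.length - 1)
    · rw [innerA_mem a t _ _ _ _ hblk] at heq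
      cases heq; rfl
    · rw [innerA_fold a t _ _ _ _ hblk] at heq
      cases heq
  | case3 idx st h hskip st' heq ih =>
    intro hmem
    rw [visitO, dif_pos h, if_neg hskip] at hmem
    by_cases hblk : t ∈ visitI a t (a.getD idx 0) (idx+1) (a.length - 1)
    · rw [innerA_mem a t _ _ _ _ hblk] at heq
      cases heq
    · apply ih
      rcases List.mem_append.1 hmem with hm | hm
      · exact absurd hm hblk
      · exact hm
  | case4 idx st h =>
    intro hmem
    rw [visitO, dif_neg h] at hmem
    simp at hmem

lemma outerA_fold (a : List Int) (t : Int) :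
    ∀ idx st, t ∉ visitO a t idx →
      outerA a t idx st = Sum.inr ((visitO a t idx).foldl (updA t) st) := by
  intro idx st
  fun_induction outerA a t idx st with
  | case1 idx st h hskip ih =>
    intro hmem
    rw [visitO, dif_pos h, if_pos hskip] at hmem ⊢
    rw [List.nil_append]
    exact ih (by simpa using hmem)
  | case2 idx st h hskip v heq =>
    intro hmem
    rw [visitO, dif_pos h, if_neg hskip] at hmem
    exfalso
    by_cases hblk : t ∈ visitI a t (a.getD idx 0) (idx+1) (a.length - 1)
    · exact hmem (List.mem_append.2 (Or.inl hblk))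
    · rw [innerA_fold a t _ _ _ _ hblk] at heq
      cases heq
  | case3 idx st h hskip st' heq ih =>
    intro hmem
    rw [visitO, dif_pos h, if_neg hskip] at hmem ⊢
    have hblk : t ∉ visitI a t (a.getD idx 0) (idx+1) (a.length - 1) :=
      fun hc => hmem (List.mem_append.2 (Or.inl hc))
    rw [innerA_fold a t _ _ _ _ hblk] at heq
    cases heq
    rw [List.foldl_append]
    exact ih (fun hc => hmem (List.mem_append.2 (Or.inr hc)))
  | case4 idx st h =>
    intro _
    rw [visitO, dif_neg h]
    rfl

-- keyLE t t is minimal at t itself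
lemma keyLE_self_min (t s : Int) : keyLE t t s := by
  unfold keyLE
  by_cases hz : |t - s| = 0
  · have := abs_eq_zero.mp hz
    right
    constructor
    · rw [hz]; simp
    · omega
  · left
    have h1 : |t - t| = 0 := by simp
    have h2 : 0 ≤ |t - s| := abs_nonneg _
    omega

-- ===== VERDICT (by name: the statement is the Claim_ definition above) =====
theorem triplet_sum_close_to_target_spec : Claim_equal_triplet_sum_close_to_target := by
  intro arr t hdom hpre
  unfold Spec_triplet_sum_close_to_target
  set a := PySem.List.sorted arr (fun x => x) false with hadef
  have hlen : 3 ≤ a.length := by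
    rw [hadef, PySem.List.length_sorted]; exact hpre
  have hmono : ∀ p q, p ≤ q → q < a.length → a.getD p 0 ≤ a.getD q 0 := by
    intro p q hpq hq
    have hp : p < a.length := by omega
    rw [List.getD_eq_getElem a 0 hp, List.getD_eq_getElem a 0 hq]
    exact PySem.List.sorted_id_getElem_mono arr hpq hq
  have hsub : ∀ s ∈ visitO a t 0, s ∈ sumsB a := fun s hs => visitO_sub a t 0 s hs
  have hcomp : ∀ s ∈ sumsB a, ∃ s' ∈ visitO a t 0, Between s t s' := by
    intro s hs
    obtain ⟨i, j, k, h1, h2, h3, rfl⟩ := mem_sumsB.1 hs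
    exact outer_complete a t hmono i j k h1 h2 h3
  have h012 : a.getD 0 0 + a.getD 1 0 + a.getD 2 0 ∈ sumsB a :=
    mem_sumsB.2 ⟨0, 1, 2, by omega, by omega, by omega, rfl⟩
  have hVBne : sumsB a ≠ [] := by
    intro h; rw [h] at h012; simp at h012
  obtain ⟨mB, hminB, hfoldB⟩ := foldl_none_char t (sumsB a) hVBne
  have hVAne : visitO a t 0 ≠ [] := by
    obtain ⟨s', hs', _⟩ := hcomp _ h012
    intro h; rw [h] at hs'; simp at hs'
  obtain ⟨mA, hminA, hfoldA⟩ := foldl_none_char t (visitO a t 0) hVAne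
  have hmBVA : mB ∈ visitO a t 0 := by
    obtain ⟨s', hs', hb⟩ := hcomp mB hminB.1
    rcases between_key hb with hlt | heq
    · exfalso
      have := hminB.2 s' (hsub s' hs')
      unfold keyLE at this; omega
    · rwa [heq] at hs'
  have hminA' : MinOf t (visitO a t 0) mB := ⟨hmBVA, fun s hs => hminB.2 s (hsub s hs)⟩
  have hAB : mA = mB := minOf_unique hminA hminA'
  have hB : triplet_sum_close_to_target_alt arr t = mB := by
    show (match bLoop a t with
          | some (_, bs) => bs
          | none => 0) = mB
    rw [bLoop_eq_fold, hfoldB]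
  by_cases htA : t ∈ visitO a t 0
  · have hA : triplet_sum_close_to_target arr t = t := by
      show (match outerA a t 0 none with
            | Sum.inl v => v
            | Sum.inr (some (_, bs)) => bs
            | Sum.inr none => 0) = t
      rw [outerA_mem a t 0 none htA]
    have hmt : MinOf t (visitO a t 0) t := ⟨htA, fun s _ => keyLE_self_min t s⟩
    have : mB = t := minOf_unique hminA' hmt
    rw [hA, hB, this]
  · have hA : triplet_sum_close_to_target arr t = mA := by
      show (match outerA a t 0 none with
            | Sum.inl v => v
            | Sum.inr (some (_, bs)) => bs
            | Sum.inr none => 0) = mA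
      rw [outerA_fold a t 0 none htA, hfoldA]
    rw [hA, hB, hAB]
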